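-- pv_equiv track=rewrite | github.com/UberMetroid/chrono-mcp | scripts/ct_explorer.py | find_ascii_sequences
-- ===== SOURCE A (Python) =====
-- def find_ascii_sequences(data, min_len=6):
--     """Find sequences of printable ASCII characters"""
--     results = []
--     current = []
--
--     for i, byte in enumerate(data):
--         if 32 <= byte <= 126:
--             current.append((i, chr(byte)))
--         else:
--             if len(current) >= min_len:
--                 start = current[0][0]
--                 text = ''.join(c for _, c in current)
--                 results.append((start, text))
--             current = []
--
--     if len(current) >= min_len:
--         start = current[0][0]
--         text = ''.join(c for _, c in current)
--         results.append((start, text))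
--
--     return results
-- ===== SOURCE B (Python) =====
-- def find_ascii_sequences(data, min_len=6):
--     """Find sequences of printable ASCII characters"""
--     results = []
--     n = len(data)
--     i = 0
--     while i < n:
--         if 32 <= data[i] <= 126:
--             j = i + 1
--             while j < n and 32 <= data[j] <= 126:
--                 j += 1
--             if j - i >= min_len:
--                 results.append((i, ''.join(chr(b) for b in data[i:j])))
--             i = j
--         else:
--             i += 1
--     return results
-- ===== Notes on version B (the rewrite author's own statement) =====
-- stated objective: alternative
-- what changed: B replaces A's per-byte state machine (an accumulator list of (index,char) pairs flushed at each non-printable byte and at end-of-data) by two-index run scanning: find the start of a printable run, extend a second index to its end, and emit the slice directly; Pre_ excludes min_len <= 0, where A raises IndexError on any input whose data is empty or has a leading, trailing or adjacent non-printable byte (where A does return there, B returns the same value).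
-- outside the precondition, e.g. on find_ascii_sequences([65], 0): A returns [(0, 'A')], B returns [(0, 'A')]
import Mathlib
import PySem

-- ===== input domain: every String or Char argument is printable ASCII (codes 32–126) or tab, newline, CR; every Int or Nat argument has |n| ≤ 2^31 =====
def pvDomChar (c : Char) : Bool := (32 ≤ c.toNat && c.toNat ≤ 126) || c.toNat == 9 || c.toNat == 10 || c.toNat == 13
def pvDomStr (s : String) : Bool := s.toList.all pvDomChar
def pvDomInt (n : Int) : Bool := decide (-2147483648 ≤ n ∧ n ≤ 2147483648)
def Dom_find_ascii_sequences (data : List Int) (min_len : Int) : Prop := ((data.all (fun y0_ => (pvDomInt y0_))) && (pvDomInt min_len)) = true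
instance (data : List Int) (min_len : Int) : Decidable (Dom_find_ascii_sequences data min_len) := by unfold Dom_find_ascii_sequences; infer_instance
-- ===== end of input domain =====

-- B replaces A's per-byte accumulator state machine by two-index run scanning (find a printable
-- run's start, extend to its end, emit the slice); objective: alternative (same O(n) cost).
-- A raises IndexError (current[0] on an empty run) on many inputs with min_len ≤ 0; Pre_ excludes min_len ≤ 0.

-- ===== PORT A =====
-- chr(b) for 32 ≤ b ≤ 126
def pvChr (b : Int) : Char := Char.ofNat b.toNat

-- the two identical flush blocks of A; `pyGet? current 0` is none exactly where Python's
-- `current[0]` raises IndexError (empty `current`), excluded by Pre_; `.getD (0, ' ')` is unreachable there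
def pvFlushA (min_len : Int) (results : List (Int × String)) (current : List (Int × Char)) :
    List (Int × String) :=
  if min_len ≤ (current.length : Int) then
    results ++ [(((PySem.List.pyGet? current 0).getD (0, ' ')).1,
                 String.ofList (current.map Prod.snd))]
  else results

def find_ascii_sequences (data : List Int) (min_len : Int) : List (Int × String) :=
  let fin :=
    (PySem.List.enumerate data).foldl
      (fun (s : List (Int × String) × List (Int × Char)) p =>
        if 32 ≤ p.2 ∧ p.2 ≤ 126 then (s.1, s.2 ++ [(p.1, pvChr p.2)])
        else (pvFlushA min_len s.1 s.2, []))
      ([], [])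
  pvFlushA min_len fin.1 fin.2

-- ===== PORT B =====
def pvPrintable (b : Int) : Bool := decide (32 ≤ b ∧ b ≤ 126)

-- B's inner/outer while loops: at a printable byte take the whole run (inner `while j < n and …`),
-- emit the slice if long enough, resume after the run; i is the absolute index of the list head
def pvScanB (min_len : Int) : Nat → Int → List Int → List (Int × String)
  | _, _, [] => []
  | 0, _, _ => []   -- fuel ≥ length at every call, so this guard is never reached
  | fuel + 1, i, b :: rest =>
    if pvPrintable b then
      let run := (b :: rest).takeWhile pvPrintable
      (if min_len ≤ (run.length : Int) then [(i, String.ofList (run.map pvChr))] else []) ++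
        pvScanB min_len fuel (i + run.length) ((b :: rest).dropWhile pvPrintable)
    else
      pvScanB min_len fuel (i + 1) rest

def find_ascii_sequences_alt (data : List Int) (min_len : Int) : List (Int × String) :=
  pvScanB min_len data.length 0 data

-- ===== PRECONDITION & SPEC =====
-- Pre_ excludes min_len ≤ 0: there A raises IndexError (current[0] on an empty run) whenever the
-- data is empty or has a leading, trailing or adjacent non-printable byte; on the remaining
-- min_len ≤ 0 inputs A returns and B returns the same value (see the cite in claim.json).
def Pre_find_ascii_sequences (data : List Int) (min_len : Int) : Prop := 1 ≤ min_len
instance (data : List Int) (min_len : Int) : Decidable (Pre_find_ascii_sequences data min_len) := by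
  unfold Pre_find_ascii_sequences; infer_instance

def pvWitness_find_ascii_sequences : List Int × Int := ([72, 105, 33, 10, 65], 2)

def Spec_find_ascii_sequences (data : List Int) (min_len : Int) (out : List (Int × String)) : Prop :=
  out = find_ascii_sequences_alt data min_len
instance (data : List Int) (min_len : Int) (out : List (Int × String)) : Decidable (Spec_find_ascii_sequences data min_len out) := by unfold Spec_find_ascii_sequences; infer_instance

-- ===== CLAIM (what is proved, stated in full; the proofs are below) =====
def Claim_equal_find_ascii_sequences : Prop := ∀ (data : List Int) (min_len : Int), Dom_find_ascii_sequences data min_len → Pre_find_ascii_sequences data min_len → Spec_find_ascii_sequences data min_len (find_ascii_sequences data min_len)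

-- ===== LEMMAS AND PROOFS =====

-- proof-side helpers (used only below)

-- A's fold, as explicit recursion over the byte list with the running index
def pvLoopA (ml : Int) : List Int → Int → List (Int × String) → List (Int × Char) → List (Int × String)
  | [], _, res, cur => pvFlushA ml res cur
  | b :: rest, i, res, cur =>
    if 32 ≤ b ∧ b ≤ 126 then pvLoopA ml rest (i + 1) res (cur ++ [(i, pvChr b)])
    else pvLoopA ml rest (i + 1) (pvFlushA ml res cur) []

-- the (index, char) pairs A accumulates for a printable run starting at absolute index i
def pvEnumC : Int → List Int → List (Int × Char)
  | _, [] => []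
  | i, b :: r => (i, pvChr b) :: pvEnumC (i + 1) r

theorem pvPrintable_iff (b : Int) : pvPrintable b = true ↔ (32 ≤ b ∧ b ≤ 126) := by
  simp [pvPrintable]

theorem pvBridge (ml : Int) : ∀ (xs : List Int) (i : Int) (res : List (Int × String)) (cur : List (Int × Char)),
    (let fin := (PySem.List.enumerate xs i).foldl
      (fun (s : List (Int × String) × List (Int × Char)) p =>
        if 32 ≤ p.2 ∧ p.2 ≤ 126 then (s.1, s.2 ++ [(p.1, pvChr p.2)])
        else (pvFlushA ml s.1 s.2, [])) (res, cur)
     pvFlushA ml fin.1 fin.2) = pvLoopA ml xs i res cur := by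
  intro xs
  induction xs with
  | nil => intro i res cur; simp [PySem.List.enumerate_nil, pvLoopA]
  | cons b r ih =>
    intro i res cur
    rw [PySem.List.enumerate_cons]
    by_cases hb : 32 ≤ b ∧ b ≤ 126
    · simpa [List.foldl_cons, hb, pvLoopA] using ih (i + 1) res (cur ++ [(i, pvChr b)])
    · simpa [List.foldl_cons, hb, pvLoopA] using ih (i + 1) (pvFlushA ml res cur) []

theorem pvEnumC_length (l : List Int) : ∀ i, (pvEnumC i l).length = l.length := by
  induction l with
  | nil => intro i; rfl
  | cons b r ih => intro i; simp [pvEnumC, ih]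

theorem pvEnumC_map_snd (l : List Int) : ∀ i, (pvEnumC i l).map Prod.snd = l.map pvChr := by
  induction l with
  | nil => intro i; rfl
  | cons b r ih => intro i; simp [pvEnumC, ih]

-- mid-run: A keeps appending to `current` across the printable run, nothing is emitted
-- mid-run: A keeps appending to `current` across the printable run, nothing is emitted
theorem pvLoopA_run (ml : Int) : ∀ (rest : List Int) (i : Int) (res : List (Int × String)) (pre : List (Int × Char)),
    pvLoopA ml rest i res pre =
      pvLoopA ml (rest.dropWhile pvPrintable) (i + ((rest.takeWhile pvPrintable).length : Int)) res
        (pre ++ pvEnumC i (rest.takeWhile pvPrintable)) := by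
  intro rest
  induction rest with
  | nil => intro i res pre; simp [pvEnumC]
  | cons b r ih =>
    intro i res pre
    by_cases hb : 32 ≤ b ∧ b ≤ 126
    · have hp : pvPrintable b = true := (pvPrintable_iff b).mpr hb
      rw [List.takeWhile_cons, List.dropWhile_cons]
      simp only [hp, if_true, pvLoopA, hb]
      rw [ih (i + 1) res (pre ++ [(i, pvChr b)])]
      have harith : i + 1 + ((r.takeWhile pvPrintable).length : Int) =
          i + (((r.takeWhile pvPrintable).length : Int) + 1) := by omega
      simp [pvEnumC, List.append_assoc, harith]
    · have hp : pvPrintable b = false := by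
        simp only [pvPrintable, decide_eq_false_iff_not]; omega
      rw [List.takeWhile_cons, List.dropWhile_cons]
      simp [hp, pvEnumC]

theorem pvLoopA_scan (ml : Int) (hml : 1 ≤ ml) :
    ∀ (n : Nat) (xs : List Int), xs.length ≤ n → ∀ (fuel : Nat) (i : Int) (res : List (Int × String)),
      xs.length ≤ fuel → pvLoopA ml xs i res [] = res ++ pvScanB ml fuel i xs := by
  intro n
  induction n with
  | zero =>
    intro xs hxs fuel i res _
    have hx : xs = [] := List.length_eq_zero_iff.mp (Nat.le_zero.mp hxs)
    subst hx
    cases fuel <;> simp [pvLoopA, pvScanB, pvFlushA] <;> omega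
  | succ n ih =>
    intro xs hxs fuel i res hfuel
    match xs, fuel with
    | [], fuel =>
      cases fuel <;> simp [pvLoopA, pvScanB, pvFlushA] <;> omega
    | b :: r, fuel + 1 =>
      by_cases hb : 32 ≤ b ∧ b ≤ 126
      · have hp : pvPrintable b = true := (pvPrintable_iff b).mpr hb
        -- enter the run
        simp only [pvLoopA]
        rw [if_pos hb, List.nil_append, pvLoopA_run ml r (i + 1) res [(i, pvChr b)]]
        set t := r.takeWhile pvPrintable with ht
        have hcurstr : (((i, pvChr b) :: pvEnumC (i + 1) t)).map Prod.snd = (b :: t).map pvChr := by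
          simp [pvEnumC_map_snd]
        have hrun : (b :: r).takeWhile pvPrintable = b :: t := by
          rw [List.takeWhile_cons]; simp [hp, ht]
        rcases hDrop : List.dropWhile pvPrintable r with _ | ⟨c, r'⟩
        · -- the run reaches the end of the data
          have hdrop : (b :: r).dropWhile pvPrintable = [] := by
            rw [List.dropWhile_cons]; simp [hp, hDrop]
          rw [show pvScanB ml (fuel + 1) i (b :: r) =
              (if ml ≤ (((b :: t).length : Nat) : Int) then
                 [(i, String.ofList ((b :: t).map pvChr))] else []) ++
                pvScanB ml fuel (i + (((b :: t).length : Nat) : Int)) []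
            from by simp only [pvScanB, hp, if_true, hrun, hdrop]]
          simp only [List.singleton_append, pvLoopA, pvFlushA, hcurstr]
          have hend : ∀ f : Nat, pvScanB ml f (i + (((b :: t).length : Nat) : Int)) [] = [] := by
            intro f; cases f <;> rfl
          rw [hend]
          simp only [List.length_cons, PySem.List.pyGet?_zero_cons, Option.getD_some,
            pvEnumC_length, List.append_nil]
          split_ifs with h1
          · simp
          · simp
        · -- the run is ended by the non-printable byte c
          have hdrop : (b :: r).dropWhile pvPrintable = c :: r' := by
            rw [List.dropWhile_cons]; simp [hp, hDrop]
          have hdne : r.dropWhile pvPrintable ≠ [] := by rw [hDrop]; simp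
          have hc : pvPrintable c = false := by
            have h1 := List.head_dropWhile_not pvPrintable hdne
            have h2 : (r.dropWhile pvPrintable).head hdne = c := by simp [hDrop]
            rw [h2] at h1; simpa using h1
          have hcn : ¬(32 ≤ c ∧ c ≤ 126) := by
            simp only [pvPrintable, decide_eq_false_iff_not] at hc; exact hc
          have hflen : r'.length + 1 ≤ r.length := by
            have := List.length_dropWhile_le pvPrintable r
            rw [hDrop] at this; simpa using this
          obtain ⟨f, rfl⟩ : ∃ f, fuel = f + 1 := by
            refine ⟨fuel - 1, ?_⟩
            have : r.length ≤ fuel := by simpa using hfuel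
            omega
          rw [show pvScanB ml (f + 1 + 1) i (b :: r) =
              (if ml ≤ (((b :: t).length : Nat) : Int) then
                 [(i, String.ofList ((b :: t).map pvChr))] else []) ++
                pvScanB ml (f + 1) (i + (((b :: t).length : Nat) : Int)) (c :: r')
            from by simp only [pvScanB, hp, if_true, hrun, hdrop]]
          rw [show pvScanB ml (f + 1) (i + (((b :: t).length : Nat) : Int)) (c :: r') =
                pvScanB ml f (i + (((b :: t).length : Nat) : Int) + 1) r'
              from by simp [pvScanB, hc]]
          simp only [List.singleton_append, pvLoopA]
          rw [if_neg hcn]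
          rw [ih r' (by have h1 : (b :: r).length = r.length + 1 := rfl; omega) f _ _ (by have h1 : (b :: r).length = r.length + 1 := rfl; omega)]
          have hflush : pvFlushA ml (res : List (Int × String)) ((i, pvChr b) :: pvEnumC (i + 1) t) =
              if ml ≤ (((b :: t).length : Nat) : Int) then
                res ++ [(i, String.ofList ((b :: t).map pvChr))] else res := by
            simp only [pvFlushA, PySem.List.pyGet?_zero_cons, Option.getD_some, hcurstr,
              List.length_cons, pvEnumC_length]
            rfl
          rw [hflush]
          have hidx : i + 1 + ((t.length : Nat) : Int) + 1 =
              i + (((b :: t).length : Nat) : Int) + 1 := by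
            have h1 : (b :: t).length = t.length + 1 := rfl
            rw [h1]; push_cast; omega
          rw [hidx]
          split_ifs <;> simp
      · have hp : pvPrintable b = false := by
          simp only [pvPrintable, decide_eq_false_iff_not]; omega
        simp only [pvLoopA]
        rw [if_neg hb]
        have hfl : pvFlushA ml res [] = res := by
          simp only [pvFlushA, List.length_nil]
          rw [if_neg (by omega : ¬ ml ≤ ((0 : Nat) : Int))]
        rw [hfl, show pvScanB ml (fuel + 1) i (b :: r) = pvScanB ml fuel (i + 1) r
              from by simp [pvScanB, hp]]
        exact ih r (by simp at hxs; omega) fuel (i + 1) res (by simp at hfuel; omega)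

theorem find_ascii_sequences_spec : Claim_equal_find_ascii_sequences := by
  intro data min_len _ hpre
  unfold Spec_find_ascii_sequences find_ascii_sequences find_ascii_sequences_alt
  rw [pvBridge min_len data 0 [] []]
  exact pvLoopA_scan min_len hpre data.length data le_rfl data.length 0 [] le_rfl
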